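-- pv_equiv track=rewrite | github.com/makes/plasma-dsp2022 | makecsv.py | generate_feature_gap
-- ===== SOURCE A (Python) =====
-- def generate_feature_gap(row):
--     gap = None
--     n = 0
--     while f's{n}_zeros' in row:
--         if row[f's{n}_zeros'] == 1 and gap is None:
--             gap = 0
--         elif row[f's{n}_zeros'] != 1 and gap == 0:
--             gap = 1
--         n += 1
--     if gap is None:
--         gap = 0
--     return gap
-- ===== SOURCE B (Python) =====
-- def generate_feature_gap(row):
--     vals = []
--     n = 0
--     while f's{n}_zeros' in row:
--         vals.append(row[f's{n}_zeros'])
--         n += 1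
--     i = next((j for j, v in enumerate(vals) if v == 1), None)
--     if i is None:
--         return 0
--     return 1 if any(v != 1 for v in vals[i + 1:]) else 0
-- ===== Notes on version B (the rewrite author's own statement) =====
-- stated objective: alternative
-- what changed: Replaced A's single-pass None/0/1 accumulator state machine with a build-then-locate-then-scan decomposition: collect the s{n}_zeros values into a list, find the first value equal to 1, then report 1 iff any later value differs from 1.
import Mathlib
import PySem

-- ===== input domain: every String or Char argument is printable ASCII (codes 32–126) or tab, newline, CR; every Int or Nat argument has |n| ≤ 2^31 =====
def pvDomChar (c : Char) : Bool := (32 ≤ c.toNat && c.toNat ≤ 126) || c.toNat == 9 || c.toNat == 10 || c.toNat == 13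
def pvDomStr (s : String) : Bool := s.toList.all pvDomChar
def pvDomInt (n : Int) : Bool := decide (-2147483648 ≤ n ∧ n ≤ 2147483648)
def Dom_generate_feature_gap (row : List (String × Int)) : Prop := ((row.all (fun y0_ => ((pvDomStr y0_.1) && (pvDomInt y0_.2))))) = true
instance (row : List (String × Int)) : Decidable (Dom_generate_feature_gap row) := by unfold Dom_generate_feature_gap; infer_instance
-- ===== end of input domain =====

-- B replaces A's single-pass None/0/1 accumulator state machine by a build-then-locate-then-scan
-- decomposition (collect values, find the first 1, scan the tail); same cost, different structure.


-- the f-string key f's{n}_zeros'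
def pvKey (n : Nat) : String := "s" ++ PySem.Int.toStr (n : Int) ++ "_zeros"

-- ===== PORT A =====
-- A's while-loop: membership test 'f"s{n}_zeros" in row' and lookup are the dict's first-match
-- lookup (List.lookup).  Fuel row.length+1 only bounds the loop: the keys pvKey 0, pvKey 1, … are
-- pairwise distinct, so at most row.length consecutive membership tests can succeed and the fuel
-- case 0 is never the reason the loop stops.
def gfgLoopA (row : List (String × Int)) : Nat → Nat → Option Int → Option Int
  | 0, _, gap => gap
  | fuel + 1, n, gap =>
    match row.lookup (pvKey n) with
    | none => gap
    | some v =>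
        gfgLoopA row fuel (n + 1)
          (if v = 1 ∧ gap = none then some 0
           else if v ≠ 1 ∧ gap = some 0 then some 1
           else gap)

def generate_feature_gap (row : List (String × Int)) : Int :=
  match gfgLoopA row (row.length + 1) 0 none with
  | none => 0
  | some g => g

-- ===== PORT B =====
-- B's collection loop: same membership/lookup, same fuel bound as above.
def gfgCollect (row : List (String × Int)) : Nat → Nat → List Int
  | 0, _ => []
  | fuel + 1, n =>
    match row.lookup (pvKey n) with
    | none => []
    | some v => v :: gfgCollect row fuel (n + 1)

-- 'next((j for j, v in enumerate(vals) if v == 1), None)' → List.findIdx?;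
-- 'vals[i+1:]' with i ≥ 0 → List.drop (i+1); 'any(v != 1 …)' → List.any.
def generate_feature_gap_alt (row : List (String × Int)) : Int :=
  let vals := gfgCollect row (row.length + 1) 0
  match vals.findIdx? (· == 1) with
  | none => 0
  | some i => if (vals.drop (i + 1)).any (· != 1) then 1 else 0

-- ===== PRECONDITION & SPEC =====
def Spec_generate_feature_gap (row : List (String × Int)) (out : Int) : Prop := out = generate_feature_gap_alt row
instance (row : List (String × Int)) (out : Int) : Decidable (Spec_generate_feature_gap row out) := by unfold Spec_generate_feature_gap; infer_instance

-- ===== CLAIM (what is proved, stated in full; the proofs are below) =====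
def Claim_equal_generate_feature_gap : Prop := ∀ (row : List (String × Int)), Dom_generate_feature_gap row → Spec_generate_feature_gap row (generate_feature_gap row)

-- ===== LEMMAS AND PROOFS =====

-- A's accumulator, abstracted to the list of looked-up values
def gfgSM : List Int → Option Int → Option Int
  | [], gap => gap
  | v :: vs, gap =>
      gfgSM vs
        (if v = 1 ∧ gap = none then some 0
         else if v ≠ 1 ∧ gap = some 0 then some 1
         else gap)

lemma gfgLoopA_eq_sm (row : List (String × Int)) :
    ∀ fuel n gap, gfgLoopA row fuel n gap = gfgSM (gfgCollect row fuel n) gap := by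
  intro fuel
  induction fuel with
  | zero => intro n gap; simp [gfgLoopA, gfgCollect, gfgSM]
  | succ f ih =>
      intro n gap
      simp only [gfgLoopA, gfgCollect]
      cases row.lookup (pvKey n) with
      | none => simp [gfgSM]
      | some v => simp [gfgSM, ih]

lemma gfgSM_one (vs : List Int) : gfgSM vs (some 1) = some 1 := by
  induction vs with
  | nil => rfl
  | cons v vs ih => simp [gfgSM, ih]

lemma gfgSM_zero (vs : List Int) :
    gfgSM vs (some 0) = some (if vs.any (· != 1) then 1 else 0) := by
  induction vs with
  | nil => simp [gfgSM]
  | cons v vs ih =>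
      by_cases hv : v = 1
      · subst hv; simpa [gfgSM] using ih
      · simp [gfgSM, hv, gfgSM_one]

-- B's value as a function of the collected list
def gfgB (vs : List Int) : Int :=
  match vs.findIdx? (· == 1) with
  | none => 0
  | some i => if (vs.drop (i + 1)).any (· != 1) then 1 else 0

lemma gfgSM_none (vs : List Int) :
    (match gfgSM vs none with | none => (0 : Int) | some g => g) = gfgB vs := by
  induction vs with
  | nil => rfl
  | cons v vs ih =>
      by_cases hv : v = 1
      · subst hv
        simp [gfgSM, gfgB, List.findIdx?_cons, gfgSM_zero]
      · have hb : (v == 1) = false := by simp [hv]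
        simp only [gfgSM, gfgB, List.findIdx?_cons, hv, false_and, if_false,
          hb, Bool.false_eq_true] at *
        cases h : vs.findIdx? (· == 1) with
        | none => simpa [gfgB, h] using ih
        | some i => simpa [gfgB, h, List.drop_succ_cons] using ih

-- ===== VERDICT (by name: the statement is the Claim_ definition above) =====
theorem generate_feature_gap_spec : Claim_equal_generate_feature_gap := by
  intro row _
  unfold Spec_generate_feature_gap generate_feature_gap generate_feature_gap_alt
  rw [gfgLoopA_eq_sm]
  exact gfgSM_none _
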